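-- pv_equiv track=rewrite | github.com/Jazz23/CodeSlobCleanup | codebases/exclusion-test/main.py | ubiquitous_slob
-- ===== SOURCE A (Python) =====
-- def ubiquitous_slob(a):
--     res = 0
--     for i in range(a):
--         if i % 2 == 0:
--             if i % 4 == 0:
--                 if i % 8 == 0:
--                     res += i * i
--                 else:
--                     res += i * 2
--             else:
--                 if i % 6 == 0:
--                     res += i * 3
--                 else:
--                     res += i
--         else:
--             if i % 3 == 0:
--                 if i % 9 == 0:
--                     res -= i * 2
--                 else:
--                     res -= i
--             else:
--                 if i % 5 == 0:
--                     res += 10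
--                 else:
--                     res += 1
--     return res
-- ===== SOURCE B (Python) =====
-- def ubiquitous_slob(a):
--     # O(1): closed-form arithmetic/quadratic series per residue class mod 360.
--     total = 0
--     for r in range(360):
--         m = (a - r + 359) // 360
--         if m < 0:
--             m = 0
--         s1 = m * (m - 1) // 2                      # sum of k for k < m
--         s2 = (m - 1) * m * (2 * m - 1) // 6        # sum of k*k for k < m
--         lin = m * r + 360 * s1                     # sum of (r + 360k) for k < m
--         if r % 2 == 0:
--             if r % 4 == 0:
--                 if r % 8 == 0:
--                     total += m * r * r + 720 * r * s1 + 129600 * s2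
--                 else:
--                     total += 2 * lin
--             else:
--                 total += (3 if r % 6 == 0 else 1) * lin
--         else:
--             if r % 3 == 0:
--                 total += (-2 if r % 9 == 0 else -1) * lin
--             else:
--                 total += (10 if r % 5 == 0 else 1) * m
--     return total
-- ===== Notes on version B (the rewrite author's own statement) =====
-- stated objective: faster
-- what changed: Replaces the O(a) loop over range(a) by a closed-form evaluation: for each of the 360 residue classes mod 360 (the lcm of all branch moduli) it sums the class's constant/linear/quadratic contribution with Gauss and square-pyramidal formulas.
import Mathlib
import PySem

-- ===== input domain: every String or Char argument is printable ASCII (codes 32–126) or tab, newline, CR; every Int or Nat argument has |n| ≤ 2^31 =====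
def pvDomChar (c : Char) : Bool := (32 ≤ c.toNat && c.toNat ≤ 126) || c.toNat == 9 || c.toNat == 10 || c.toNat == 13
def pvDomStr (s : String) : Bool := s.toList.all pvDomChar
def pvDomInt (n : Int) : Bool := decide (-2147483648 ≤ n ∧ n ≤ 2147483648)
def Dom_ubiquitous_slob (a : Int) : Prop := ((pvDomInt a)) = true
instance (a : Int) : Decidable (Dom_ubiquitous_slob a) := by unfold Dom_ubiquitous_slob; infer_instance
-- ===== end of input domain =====

-- B replaces A's O(a) loop by an O(1) closed-form sum over the 360 residue classes mod 360 (faster, asymptotic).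


-- ===== PORT A =====
def ubiquitous_slob (a : Int) : Int :=
  (PySem.List.pyRange 0 a 1).foldl (fun res i =>
    if PySem.Int.mod i 2 = 0 then
      if PySem.Int.mod i 4 = 0 then
        if PySem.Int.mod i 8 = 0 then res + i * i
        else res + i * 2
      else
        if PySem.Int.mod i 6 = 0 then res + i * 3
        else res + i
    else
      if PySem.Int.mod i 3 = 0 then
        if PySem.Int.mod i 9 = 0 then res - i * 2
        else res - i
      else
        if PySem.Int.mod i 5 = 0 then res + 10
        else res + 1) 0

-- ===== PORT B =====
-- one residue class's closed-form contribution, added to the running total (Source B's loop body)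
def pvClassStep (a : Int) (total : Int) (r : Int) : Int :=
  let m0 := PySem.Int.floordiv (a - r + 359) 360
  let m := if m0 < 0 then 0 else m0
  let s1 := PySem.Int.floordiv (m * (m - 1)) 2
  let s2 := PySem.Int.floordiv ((m - 1) * m * (2 * m - 1)) 6
  let lin := m * r + 360 * s1
  if PySem.Int.mod r 2 = 0 then
    if PySem.Int.mod r 4 = 0 then
      if PySem.Int.mod r 8 = 0 then total + (m * r * r + 720 * r * s1 + 129600 * s2)
      else total + 2 * lin
    else total + (if PySem.Int.mod r 6 = 0 then 3 else 1) * lin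
  else
    if PySem.Int.mod r 3 = 0 then total + (if PySem.Int.mod r 9 = 0 then -2 else -1) * lin
    else total + (if PySem.Int.mod r 5 = 0 then 10 else 1) * m

def ubiquitous_slob_alt (a : Int) : Int :=
  (PySem.List.pyRange 0 360 1).foldl (pvClassStep a) 0

-- ===== PRECONDITION & SPEC =====
def Spec_ubiquitous_slob (a : Int) (out : Int) : Prop := out = ubiquitous_slob_alt a
instance (a : Int) (out : Int) : Decidable (Spec_ubiquitous_slob a out) := by unfold Spec_ubiquitous_slob; infer_instance

-- ===== CLAIM (what is proved, stated in full; the proofs are below) =====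
def Claim_equal_ubiquitous_slob : Prop := ∀ (a : Int), Dom_ubiquitous_slob a → Spec_ubiquitous_slob a (ubiquitous_slob a)

-- ===== LEMMAS AND PROOFS =====

-- the value A adds at index i
def pvF (i : Int) : Int :=
  if PySem.Int.mod i 2 = 0 then
    if PySem.Int.mod i 4 = 0 then
      if PySem.Int.mod i 8 = 0 then i * i
      else i * 2
    else
      if PySem.Int.mod i 6 = 0 then i * 3
      else i
  else
    if PySem.Int.mod i 3 = 0 then
      if PySem.Int.mod i 9 = 0 then -(i * 2)
      else -i
    else
      if PySem.Int.mod i 5 = 0 then 10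
      else 1

-- the value B adds for residue class r
def pvG (a r : Int) : Int := pvClassStep a 0 r

theorem pvA_sum (a : Int) :
    ubiquitous_slob a = ((PySem.List.pyRange 0 a 1).map pvF).sum := by
  unfold ubiquitous_slob
  have h : (fun (res i : Int) =>
      if PySem.Int.mod i 2 = 0 then
        if PySem.Int.mod i 4 = 0 then
          if PySem.Int.mod i 8 = 0 then res + i * i
          else res + i * 2
        else
          if PySem.Int.mod i 6 = 0 then res + i * 3
          else res + i
      else
        if PySem.Int.mod i 3 = 0 then
          if PySem.Int.mod i 9 = 0 then res - i * 2
          else res - i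
        else
          if PySem.Int.mod i 5 = 0 then res + 10
          else res + 1) = fun res i => res + pvF i := by
    funext res i
    unfold pvF
    split_ifs <;> ring
  rw [h, PySem.List.foldl_add]
  ring

theorem pvB_sum (a : Int) :
    ubiquitous_slob_alt a = ((PySem.List.pyRange 0 360 1).map (pvG a)).sum := by
  unfold ubiquitous_slob_alt
  have h : pvClassStep a = fun t r => t + pvG a r := by
    funext t r
    simp only [pvG, pvClassStep]
    split_ifs <;> ring
  rw [h, PySem.List.foldl_add]
  ring

theorem pvG_zero {a r : Int} (h : a ≤ r) : pvG a r = 0 := by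
  have hq0 : PySem.Int.floordiv (a - r + 359) 360 ≤ 0 := by
    rw [PySem.Int.floordiv_eq_ediv_of_pos (by norm_num)]
    omega
  have hm : (if PySem.Int.floordiv (a - r + 359) 360 < 0 then (0:Int)
      else PySem.Int.floordiv (a - r + 359) 360) = 0 := by
    split <;> omega
  have f2 : PySem.Int.floordiv ((0:Int) * (0 - 1)) 2 = 0 := by decide
  have f6 : PySem.Int.floordiv (((0:Int) - 1) * 0 * (2 * 0 - 1)) 6 = 0 := by decide
  simp only [pvG, pvClassStep, hm, f2, f6]
  split_ifs <;> ring

theorem pvG_same {n r : Int} (hr0 : 0 ≤ r) (hr1 : r < 360)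
    (h : PySem.Int.mod n 360 ≠ r) : pvG (n + 1) r = pvG n r := by
  have hmod : PySem.Int.mod n 360 = n % 360 :=
    PySem.Int.mod_eq_emod_of_pos (by norm_num)
  have hq : PySem.Int.floordiv (n + 1 - r + 359) 360
      = PySem.Int.floordiv (n - r + 359) 360 := by
    rw [PySem.Int.floordiv_eq_ediv_of_pos (by norm_num),
        PySem.Int.floordiv_eq_ediv_of_pos (by norm_num)]
    rw [hmod] at h
    omega
  simp only [pvG, pvClassStep, hq]

theorem pv_s1_succ (m : Int) :
    PySem.Int.floordiv ((m + 1) * (m + 1 - 1)) 2 = PySem.Int.floordiv (m * (m - 1)) 2 + m := by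
  obtain ⟨t, ht⟩ := Int.even_mul_succ_self (m - 1)
  rw [PySem.Int.floordiv_eq_ediv_of_pos (by norm_num),
      PySem.Int.floordiv_eq_ediv_of_pos (by norm_num),
      show (m + 1) * (m + 1 - 1) = t + t + (m + m) by linear_combination ht,
      show m * (m - 1) = t + t by linear_combination ht]
  omega

theorem pv_six_dvd : ∀ (k : Nat), (6:Int) ∣ ((k:Int) - 1) * k * (2 * k - 1) := by
  intro k
  induction k with
  | zero => norm_num
  | succ p ih =>
    obtain ⟨u, hu⟩ := ih
    refine ⟨u + (p:Int) * p, ?_⟩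
    push_cast
    linear_combination hu

theorem pv_s2_succ (m : Int) (hm : 0 ≤ m) :
    PySem.Int.floordiv ((m + 1 - 1) * (m + 1) * (2 * (m + 1) - 1)) 6
      = PySem.Int.floordiv ((m - 1) * m * (2 * m - 1)) 6 + m * m := by
  obtain ⟨k, rfl⟩ := Int.eq_ofNat_of_zero_le hm
  obtain ⟨u, hu⟩ := pv_six_dvd k
  rw [PySem.Int.floordiv_eq_ediv_of_pos (by norm_num),
      PySem.Int.floordiv_eq_ediv_of_pos (by norm_num),
      show ((k:Int) + 1 - 1) * ((k:Int) + 1) * (2 * ((k:Int) + 1) - 1)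
        = 6 * u + 6 * ((k:Int) * (k:Int)) by linear_combination hu,
      show ((k:Int) - 1) * (k:Int) * (2 * (k:Int) - 1) = 6 * u by linear_combination hu]
  generalize (k:Int) * (k:Int) = w
  omega

theorem pvG_hit {n r : Int} (hn : 0 ≤ n) (hr : PySem.Int.mod n 360 = r) :
    pvG (n + 1) r = pvG n r + pvF n := by
  have hmod : PySem.Int.mod n 360 = n % 360 :=
    PySem.Int.mod_eq_emod_of_pos (by norm_num)
  set m : Int := n / 360 with hmdef
  have hnr : n = 360 * m + r := by rw [hmdef]; omega
  have hm0 : 0 ≤ m := by rw [hmdef]; omega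
  have hr0 : 0 ≤ r := by omega
  have hr1 : r < 360 := by omega
  have hqn : PySem.Int.floordiv (n - r + 359) 360 = m := by
    rw [PySem.Int.floordiv_eq_ediv_of_pos (by norm_num)]
    omega
  have hqn1 : PySem.Int.floordiv (n + 1 - r + 359) 360 = m + 1 := by
    rw [PySem.Int.floordiv_eq_ediv_of_pos (by norm_num)]
    omega
  have hifn : (if m < 0 then (0:Int) else m) = m := by omega
  have hifn1 : (if m + 1 < 0 then (0:Int) else m + 1) = m + 1 := by omega
  have hmods : ∀ k : Int, 0 < k → k ∣ (360:Int) →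
      PySem.Int.mod n k = PySem.Int.mod r k := by
    intro k hk h360
    obtain ⟨d, hd⟩ := h360
    rw [PySem.Int.mod_eq_emod_of_pos hk, PySem.Int.mod_eq_emod_of_pos hk,
      show n = r + k * (d * m) by rw [hnr]; linear_combination m * hd,
      Int.add_mul_emod_self_left]
  simp only [pvG, pvClassStep, pvF, hqn, hqn1, hifn, hifn1, pv_s1_succ m,
    pv_s2_succ m hm0,
    hmods 2 (by norm_num) (by decide), hmods 4 (by norm_num) (by decide),
    hmods 8 (by norm_num) (by decide), hmods 6 (by norm_num) (by decide),
    hmods 3 (by norm_num) (by decide), hmods 9 (by norm_num) (by decide),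
    hmods 5 (by norm_num) (by decide)]
  rw [hnr]
  split_ifs <;> ring

theorem pv_sum_ite_single {c v : Int} : ∀ (l : List Int), l.Nodup → c ∈ l →
    (l.map (fun r => if r = c then v else 0)).sum = v := by
  intro l
  induction l with
  | nil => intro _ hc; cases hc
  | cons x xs ih =>
    intro hnd hc
    simp only [List.map_cons, List.sum_cons]
    by_cases hx : x = c
    · subst hx
      rw [if_pos rfl]
      have hzero : (xs.map (fun r => if r = x then v else 0)).sum = 0 := by
        apply List.sum_eq_zero
        intro y hy
        simp only [List.mem_map] at hy
        obtain ⟨r, hrmem, rfl⟩ := hy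
        have : r ≠ x := fun h => (List.nodup_cons.mp hnd).1 (h ▸ hrmem)
        simp [this]
      rw [hzero]; ring
    · have hcxs : c ∈ xs := by
        rcases List.mem_cons.mp hc with h | h
        · exact absurd h.symm hx
        · exact h
      rw [if_neg hx, ih (List.nodup_cons.mp hnd).2 hcxs]
      ring

theorem pvMain (n : Nat) :
    ((PySem.List.pyRange 0 360 1).map (pvG (n : Int))).sum
      = ((List.range n).map (fun (k : Nat) => pvF (k : Int))).sum := by
  induction n with
  | zero =>
    simp only [List.range_zero, Nat.cast_zero]
    apply List.sum_eq_zero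
    intro x hx
    simp only [List.mem_map] at hx
    obtain ⟨r, hr, rfl⟩ := hx
    rw [PySem.List.mem_pyRange_one] at hr
    exact pvG_zero hr.1
  | succ p ih =>
    have hcast : ((p + 1 : Nat) : Int) = (p : Int) + 1 := by push_cast; ring
    have hmap : (PySem.List.pyRange 0 360 1).map (pvG ((p : Int) + 1))
        = (PySem.List.pyRange 0 360 1).map
            (fun r => pvG (p : Int) r + (if r = PySem.Int.mod (p : Int) 360 then pvF (p : Int) else 0)) := by
      apply List.map_congr_left
      intro r hrmem
      rw [PySem.List.mem_pyRange_one] at hrmem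
      by_cases h : PySem.Int.mod (p : Int) 360 = r
      · rw [if_pos h.symm, pvG_hit (by positivity) h]
      · rw [if_neg (fun hh => h hh.symm), pvG_same hrmem.1 hrmem.2 h]
        ring
    rw [hcast, hmap, PySem.List.sum_map_add_int, ih,
      pv_sum_ite_single _ (PySem.List.nodup_pyRange_one 0 360)
        (PySem.List.mem_pyRange_one.mpr
          ⟨PySem.Int.mod_nonneg _ (by norm_num), PySem.Int.mod_lt _ (by norm_num)⟩),
      List.range_succ]
    simp

-- ===== VERDICT (by name: the statement is the Claim_ definition above) =====
theorem ubiquitous_slob_spec : Claim_equal_ubiquitous_slob := by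
  intro a _
  show ubiquitous_slob a = ubiquitous_slob_alt a
  rw [pvA_sum, pvB_sum]
  rcases le_or_gt a 0 with ha | ha
  · have h1 : PySem.List.pyRange 0 a 1 = [] := by
      rw [PySem.List.pyRange_one]
      have h0 : (a - 0).toNat = 0 := by omega
      rw [h0, List.range_zero, List.map_nil]
    rw [h1]
    simp only [List.map_nil, List.sum_nil]
    symm
    apply List.sum_eq_zero
    intro x hx
    simp only [List.mem_map] at hx
    obtain ⟨r, hr, rfl⟩ := hx
    rw [PySem.List.mem_pyRange_one] at hr
    exact pvG_zero (by omega)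
  · have hcast : a = ((a.toNat : Int)) := by omega
    conv_rhs => rw [hcast]
    rw [pvMain a.toNat]
    conv_lhs => rw [hcast]
    rw [PySem.List.pyRange_one]
    have h2 : ((a.toNat : Int) - 0).toNat = a.toNat := by omega
    rw [h2, List.map_map]
    simp only [Function.comp_def, zero_add]
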